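-- pv_equiv track=rewrite | github.com/Soham-Moholkar/alocampus | projects/backend/app/infra/db/database.py | _to_postgres_placeholders
-- ===== SOURCE A (Python) =====
-- def _to_postgres_placeholders(sql: str) -> str:
--     parts = sql.split("?")
--     if len(parts) == 1:
--         return sql
--     rebuilt = [parts[0]]
--     for idx, tail in enumerate(parts[1:], start=1):
--         rebuilt.append(f"${idx}{tail}")
--     return "".join(rebuilt)
-- ===== SOURCE B (Python) =====
-- def _to_postgres_placeholders(sql: str) -> str:
--     out = []
--     n = 0
--     for ch in sql:
--         if ch == "?":
--             n += 1
--             out.append(f"${n}")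
--         else:
--             out.append(ch)
--     return "".join(out)
-- ===== Notes on version B (the rewrite author's own statement) =====
-- stated objective: simpler
-- what changed: Replaces split-on-question-mark plus enumerate-and-rebuild of the parts list with a single left-to-right character scan carrying a counter that emits the next dollar-number placeholder at each question mark.
import Mathlib
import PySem

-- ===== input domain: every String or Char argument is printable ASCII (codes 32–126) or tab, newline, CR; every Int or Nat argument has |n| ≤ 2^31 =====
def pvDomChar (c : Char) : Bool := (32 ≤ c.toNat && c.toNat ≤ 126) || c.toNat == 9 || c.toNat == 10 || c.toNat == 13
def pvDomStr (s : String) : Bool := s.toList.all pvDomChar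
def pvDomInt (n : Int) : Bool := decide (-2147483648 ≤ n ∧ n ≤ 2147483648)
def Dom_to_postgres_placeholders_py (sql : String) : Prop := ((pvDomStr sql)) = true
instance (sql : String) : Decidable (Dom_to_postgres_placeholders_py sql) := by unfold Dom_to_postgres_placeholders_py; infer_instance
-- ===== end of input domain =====

-- B replaces split-and-rebuild with a single counting character scan (same cost; simpler decomposition).

-- ===== PORT A =====
-- sql.split("?") has a non-empty literal separator: PySem.Chars.splitOn on the code points is exact.
def to_postgres_placeholders_py (sql : String) : String :=
  let parts := PySem.Chars.splitOn sql.toList ['?']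
  if parts.length == 1 then sql
  else
    let rebuilt := [PySem.List.pyGetD parts 0 []]
    let rebuilt := (PySem.List.enumerate (PySem.List.slice parts (some 1) none) 1).foldl
      (fun acc p => acc ++ ['$' :: (PySem.Int.toStr p.1).toList ++ p.2]) rebuilt
    String.ofList (PySem.Chars.join [] rebuilt)

-- ===== PORT B =====
-- one step of B's scan: on '?' bump the counter and emit "$n", else emit the character
def bStep (st : Int × List (List Char)) (ch : Char) : Int × List (List Char) :=
  if ch == '?' then (st.1 + 1, st.2 ++ ['$' :: (PySem.Int.toStr (st.1 + 1)).toList])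
  else (st.1, st.2 ++ [[ch]])

def to_postgres_placeholders_py_alt (sql : String) : String :=
  String.ofList (PySem.Chars.join [] (sql.toList.foldl bStep ((0 : Int), [])).2)

-- ===== PRECONDITION & SPEC =====
def Spec_to_postgres_placeholders_py (sql : String) (out : String) : Prop := out = to_postgres_placeholders_py_alt sql
instance (sql : String) (out : String) : Decidable (Spec_to_postgres_placeholders_py sql out) := by unfold Spec_to_postgres_placeholders_py; infer_instance

-- ===== CLAIM (what is proved, stated in full; the proofs are below) =====
def Claim_equal_to_postgres_placeholders_py : Prop := ∀ (sql : String), Dom_to_postgres_placeholders_py sql → Spec_to_postgres_placeholders_py sql (to_postgres_placeholders_py sql)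

-- ===== LEMMAS AND PROOFS =====

-- apply a function to the first element only
def myMapHead (h : List Char → List Char) : List (List Char) → List (List Char)
  | [] => []
  | x :: xs => h x :: xs

-- structural characterisation of splitting on '?'
def fsplit : List Char → List (List Char)
  | [] => [[]]
  | c :: t => if c = '?' then [] :: fsplit t else myMapHead (c :: ·) (fsplit t)

-- the common value of both programs (on code points), with counter n
def gspec : List Char → Int → List Char
  | [], _ => []
  | c :: t, n =>
      if c = '?' then '$' :: (PySem.Int.toStr (n + 1)).toList ++ gspec t (n + 1)
      else c :: gspec t n

lemma fsplit_ne_nil (cs : List Char) : fsplit cs ≠ [] := by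
  induction cs with
  | nil => simp [fsplit]
  | cons c t ih =>
    by_cases h : c = '?'
    · simp [fsplit, h]
    · simp only [fsplit, if_neg h]
      cases hf : fsplit t with
      | nil => exact absurd hf ih
      | cons a b => simp [myMapHead]

lemma fsplit_cons_exists (t : List Char) : ∃ a b, fsplit t = a :: b := by
  cases hf : fsplit t with
  | nil => exact absurd hf (fsplit_ne_nil t)
  | cons a b => exact ⟨a, b, rfl⟩

lemma go_eq (l : List Char) : ∀ (fuel : Nat) (cur : List Char) (acc : List (List Char)),
    l.length ≤ fuel →
    PySem.Chars.splitOn.go ['?'] fuel l cur acc = acc.reverse ++ myMapHead (cur.reverse ++ ·) (fsplit l) := by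
  induction l with
  | nil =>
    intro fuel cur acc _
    cases fuel <;> simp [PySem.Chars.splitOn.go, fsplit, myMapHead]
  | cons c t ih =>
    intro fuel cur acc h
    cases fuel with
    | zero => simp at h
    | succ f =>
      by_cases hc : c = '?'
      · have hpre : List.isPrefixOf ['?'] (c :: t) = true := by
          simp [List.isPrefixOf, hc]
        rw [PySem.Chars.splitOn.go]
        simp only [hpre, if_pos]
        have hdrop : List.drop ['?'].length (c :: t) = t := rfl
        rw [hdrop, ih f [] (cur.reverse :: acc) (by simpa using Nat.le_of_succ_le_succ h)]
        obtain ⟨a, b, hab⟩ := fsplit_cons_exists t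
        simp [fsplit, hc, hab, myMapHead]
      · have hpre : List.isPrefixOf ['?'] (c :: t) = false := by
          simp only [List.isPrefixOf, Bool.and_true, beq_eq_false_iff_ne,
            ne_eq]
          exact fun h => hc h.symm
        rw [PySem.Chars.splitOn.go]
        simp only [hpre, Bool.false_eq_true, if_false]
        rw [ih f (c :: cur) acc (by simpa using Nat.le_of_succ_le_succ h)]
        obtain ⟨a, b, hab⟩ := fsplit_cons_exists t
        simp [fsplit, hc, hab, myMapHead]

lemma splitOn_eq (cs : List Char) : PySem.Chars.splitOn cs ['?'] = fsplit cs := by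
  unfold PySem.Chars.splitOn
  rw [go_eq cs (cs.length + 1) [] [] (by omega)]
  obtain ⟨a, b, hab⟩ := fsplit_cons_exists cs
  simp [hab, myMapHead]

lemma join_nil_eq_flatten (ps : List (List Char)) : PySem.Chars.join [] ps = ps.flatten := by
  induction ps with
  | nil => simp [PySem.Chars.join_nil]
  | cons a t ih =>
    cases t with
    | nil => simp [PySem.Chars.join_singleton]
    | cons b u => rw [PySem.Chars.join_cons_cons]; simp [ih]

lemma A_eq_g (cs : List Char) : ∀ n : Int,
    ((fsplit cs).getD 0 [] :: (PySem.List.enumerate (fsplit cs).tail (n + 1)).map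
      (fun p => '$' :: (PySem.Int.toStr p.1).toList ++ p.2)).flatten = gspec cs n := by
  induction cs with
  | nil => intro n; simp [fsplit, gspec]
  | cons c t ih =>
    intro n
    obtain ⟨a, b, hab⟩ := fsplit_cons_exists t
    by_cases hc : c = '?'
    · have iht := ih (n + 1)
      rw [hab] at iht
      simp only [List.getD, List.getElem?_cons_zero, Option.getD_some, List.tail_cons,
        List.flatten_cons] at iht
      simp only [fsplit, if_pos, hab, List.getD, List.getElem?_cons_zero, Option.getD_some,
        List.tail_cons, PySem.List.enumerate_cons, List.map_cons, List.flatten_cons, gspec, hc,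
        if_pos]
      rw [← iht]
      simp
    · have iht := ih n
      rw [hab] at iht
      simp only [List.getD, List.getElem?_cons_zero, Option.getD_some, List.tail_cons,
        List.flatten_cons] at iht
      simp only [fsplit, if_neg hc, hab, myMapHead, List.getD, List.getElem?_cons_zero,
        Option.getD_some, List.tail_cons, List.flatten_cons, gspec]
      rw [← iht]
      simp

lemma B_eq_g (cs : List Char) : ∀ (n : Int) (acc : List (List Char)),
    (cs.foldl bStep (n, acc)).2.flatten = acc.flatten ++ gspec cs n := by
  induction cs with
  | nil => intro n acc; simp [gspec]
  | cons c t ih =>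
    intro n acc
    by_cases hc : c = '?'
    · simp only [List.foldl_cons, bStep, hc, beq_self_eq_true, if_pos]
      rw [ih]
      simp [gspec]
    · have hb : (c == '?') = false := by simp [hc]
      simp only [List.foldl_cons, bStep, hb, Bool.false_eq_true, if_false]
      rw [ih]
      simp [gspec, hc]

lemma no_q_eq (cs : List Char) : ∀ n : Int, (fsplit cs).length = 1 → gspec cs n = cs := by
  induction cs with
  | nil => intro n _; simp [gspec]
  | cons c t ih =>
    intro n hl
    obtain ⟨a, b, hab⟩ := fsplit_cons_exists t
    by_cases hc : c = '?'
    · exfalso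
      simp [fsplit, hc, hab] at hl
    · simp only [fsplit, if_neg hc, hab, myMapHead, List.length_cons] at hl
      simp only [gspec, if_neg hc]
      have : (fsplit t).length = 1 := by rw [hab]; simpa using hl
      rw [ih n this]

-- ===== VERDICT (by name: the statement is the Claim_ definition above) =====
theorem to_postgres_placeholders_py_spec : Claim_equal_to_postgres_placeholders_py := by
  intro sql _
  unfold Spec_to_postgres_placeholders_py to_postgres_placeholders_py to_postgres_placeholders_py_alt
  simp only [splitOn_eq]
  have hB : PySem.Chars.join [] (sql.toList.foldl bStep ((0 : Int), [])).2
      = gspec sql.toList 0 := by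
    rw [join_nil_eq_flatten, B_eq_g sql.toList 0 []]
    simp
  by_cases h : (fsplit sql.toList).length = 1
  · simp only [h, beq_self_eq_true, if_pos]
    rw [hB, no_q_eq sql.toList 0 h, String.ofList_toList]
  · have hb : ((fsplit sql.toList).length == 1) = false := by simpa using h
    simp only [hb, Bool.false_eq_true, if_false]
    rw [hB]
    congr 1
    rw [PySem.List.foldl_append_singleton_eq_map (fun p : Int × List Char =>
      '$' :: (PySem.Int.toStr p.1).toList ++ p.2)]
    rw [join_nil_eq_flatten, PySem.List.slice_from _ (by norm_num)]
    have := A_eq_g sql.toList 0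
    simp only [zero_add] at this
    rw [← this]
    obtain ⟨a, b, hab⟩ := fsplit_cons_exists sql.toList
    simp [hab, PySem.List.pyGetD_zero]
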